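-- pv_equiv track=rewrite | github.com/myampols/Square-Free-Sequence-Code | squarefree-rollhash.py | squareAtLastCharWithHash
-- ===== SOURCE A (Python) =====
-- BASE = 265
--
-- MODULUS = 101
--
-- def hashExtend(c, prevHash):
--   return (prevHash * BASE + ord(c) * 1) % MODULUS
--
-- def hashShift(cAdd, cRem, prevHash, power):
--   return (BASE * (prevHash - (ord(cRem) * power)) + ord(cAdd)) % MODULUS
--
-- def squareAtLastCharWithHash(s):
--   hashLeft = 0
--   posRight = 0
--   hashRight = 0
--   power = 1
--   len_s = len(s)
--   for suffixLength in range(2, len(s) + 1, 2):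
--     c = s[len_s - suffixLength // 2]
--     hashRight = hashExtend(c, hashRight)
--     posRight += 1
--     cAdd = s[len_s - suffixLength + 1]
--     cExt = s[len_s - suffixLength]
--     if (suffixLength == 2):
--       hashLeft = hashExtend (cExt, hashLeft)
--     else:
--       hashShifted = hashShift(cAdd, c, hashLeft, power)
--       hashLeft = hashExtend(cExt, hashShifted)
--       power = power * BASE
--     if hashLeft == hashRight:
--       return True
--   return False
-- ===== SOURCE B (Python) =====
-- BASE = 265
--
-- MODULUS = 101
--
-- def _halfHash(half):
--   # polynomial hash with the HIGHEST index most significant (reversed scan), mod 101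
--   h = 0
--   for c in reversed(half):
--     h = (h * BASE + ord(c)) % MODULUS
--   return h
--
-- def squareAtLastCharWithHash(s):
--   n = len(s)
--   for k in range(1, n // 2 + 1):
--     if _halfHash(s[n - 2 * k:n - k]) == _halfHash(s[n - k:]):
--       return True
--   return False
-- ===== Notes on version B (the rewrite author's own statement) =====
-- stated objective: simpler
-- what changed: Replaces A's streaming rolling-hash (incremental extend/shift updates with a carried power) by a direct per-suffix-length recomputation of the two half hashes from their slices, compared per k; outputs are identical, including hash-collision false positives.
import Mathlib
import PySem

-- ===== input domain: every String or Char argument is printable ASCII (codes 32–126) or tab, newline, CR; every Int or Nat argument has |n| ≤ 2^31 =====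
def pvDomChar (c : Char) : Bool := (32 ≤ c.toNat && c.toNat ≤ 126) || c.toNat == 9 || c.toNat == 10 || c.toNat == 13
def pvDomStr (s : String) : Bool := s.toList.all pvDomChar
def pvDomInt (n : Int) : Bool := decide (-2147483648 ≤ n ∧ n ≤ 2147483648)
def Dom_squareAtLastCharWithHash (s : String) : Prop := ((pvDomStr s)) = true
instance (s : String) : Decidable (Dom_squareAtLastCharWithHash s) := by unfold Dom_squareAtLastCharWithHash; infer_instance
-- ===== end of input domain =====

-- B replaces A's streaming rolling-hash state machine by a direct per-suffix recomputation of the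
-- two half hashes (simpler: no incremental shift/power state); identical outputs, including hash collisions.

-- ===== PORT A =====
def hashExtendA (c : Char) (prevHash : Int) : Int :=
  PySem.Int.mod (prevHash * 265 + (c.toNat : Int) * 1) 101

def hashShiftA (cAdd cRem : Char) (prevHash power : Int) : Int :=
  PySem.Int.mod (265 * (prevHash - (cRem.toNat : Int) * power) + (cAdd.toNat : Int)) 101

-- A's for-loop; every index read inside the loop is in range (2 ≤ suffixLength ≤ len),
-- so s[i] is read with pyGetD (the default is never used, exact there).
def loopA (cs : List Char) (lenS : Int) : List Int → Int → Int → Int → Int → Bool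
  | [], _, _, _, _ => false
  | suffixLength :: rest, hashLeft, posRight, hashRight, power =>
    let c := PySem.List.pyGetD cs (lenS - PySem.Int.floordiv suffixLength 2) ' '
    let hashRight' := hashExtendA c hashRight
    let posRight' := posRight + 1
    let cAdd := PySem.List.pyGetD cs (lenS - suffixLength + 1) ' '
    let cExt := PySem.List.pyGetD cs (lenS - suffixLength) ' '
    let hlpw : Int × Int :=
      if suffixLength == 2 then (hashExtendA cExt hashLeft, power)
      else (hashExtendA cExt (hashShiftA cAdd c hashLeft power), power * 265)
    if hlpw.1 == hashRight' then true
    else loopA cs lenS rest hlpw.1 posRight' hashRight' hlpw.2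

def squareAtLastCharWithHash (s : String) : Bool :=
  loopA s.toList (PySem.Str.len s)
    (PySem.List.pyRange 2 (PySem.Str.len s + 1) 2) 0 0 0 1

-- ===== PORT B =====
-- polynomial hash of a half, highest index most significant (reversed scan), mod 101
def halfHashB (half : List Char) : Int :=
  half.reverse.foldl (fun h c => PySem.Int.mod (h * 265 + (c.toNat : Int)) 101) 0

def loopB (cs : List Char) (n : Int) : List Int → Bool
  | [] => false
  | k :: rest =>
    if halfHashB (PySem.List.slice cs (some (n - 2 * k)) (some (n - k))) ==
       halfHashB (PySem.List.slice cs (some (n - k)) none) then true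
    else loopB cs n rest

def squareAtLastCharWithHash_alt (s : String) : Bool :=
  loopB s.toList (PySem.Str.len s)
    (PySem.List.pyRange 1 (PySem.Int.floordiv (PySem.Str.len s) 2 + 1) 1)

-- ===== PRECONDITION & SPEC =====
def Spec_squareAtLastCharWithHash (s : String) (out : Bool) : Prop := out = squareAtLastCharWithHash_alt s
instance (s : String) (out : Bool) : Decidable (Spec_squareAtLastCharWithHash s out) := by unfold Spec_squareAtLastCharWithHash; infer_instance

-- ===== CLAIM (what is proved, stated in full; the proofs are below) =====
def Claim_equal_squareAtLastCharWithHash : Prop := ∀ (s : String), Dom_squareAtLastCharWithHash s → Spec_squareAtLastCharWithHash s (squareAtLastCharWithHash s)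

-- ===== LEMMAS AND PROOFS =====

-- pure (un-reduced) polynomial value of a half, lowest index least significant
def poly : List Char → Int
  | [] => 0
  | c :: t => poly t * 265 + (c.toNat : Int)

lemma poly_append_singleton (M : List Char) (d : Char) :
    poly (M ++ [d]) = poly M + (d.toNat : Int) * 265 ^ M.length := by
  induction M with
  | nil => simp [poly]
  | cons c t ih => simp [poly, ih, pow_succ]; ring

lemma foldl_mod (l : List Char) : ∀ h : Int,
    l.foldl (fun h c => PySem.Int.mod (h * 265 + (c.toNat : Int)) 101) (h % 101)
      = (l.foldl (fun h c => h * 265 + (c.toNat : Int)) h) % 101 := by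
  induction l with
  | nil => intro h; simp
  | cons c t ih =>
    intro h
    have h1 : PySem.Int.mod (h % 101 * 265 + (c.toNat : Int)) 101
        = (h * 265 + (c.toNat : Int)) % 101 := by
      rw [PySem.Int.mod_eq_emod_of_pos (by norm_num)]; omega
    simp only [List.foldl_cons, h1, ih]

lemma poly_eq_foldr (l : List Char) :
    poly l = l.foldr (fun c y => y * 265 + (c.toNat : Int)) 0 := by
  induction l with
  | nil => simp [poly]
  | cons c t ih => simp [poly, ih]

lemma halfHashB_eq (l : List Char) : halfHashB l = poly l % 101 := by
  have := foldl_mod l.reverse 0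
  simpa [halfHashB, poly_eq_foldr] using this

lemma hashExtendA_poly (c : Char) (t : List Char) :
    hashExtendA c (poly t % 101) = poly (c :: t) % 101 := by
  simp only [hashExtendA, poly, PySem.Int.mod_eq_emod_of_pos (by norm_num : (0:Int) < 101)]
  omega

lemma hashShiftA_poly (a d : Char) (M : List Char) :
    hashShiftA a d (poly (M ++ [d]) % 101) (265 ^ M.length) = poly (a :: M) % 101 := by
  simp only [hashShiftA, poly, poly_append_singleton,
    PySem.Int.mod_eq_emod_of_pos (by norm_num : (0:Int) < 101)]
  generalize poly M = x
  generalize ((d.toNat : Int) * 265 ^ M.length) = y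
  omega

lemma getIdx (cs : List Char) (j : ℕ) (h1 : 1 ≤ j) (h2 : j ≤ cs.length) :
    PySem.List.pyGetD cs ((cs.length : Int) - (j : Int)) ' ' = cs[cs.length - j]'(by omega) := by
  have hcast : ((cs.length : Int) - (j : Int)) = ((cs.length - j : ℕ) : Int) := by omega
  rw [hcast, PySem.List.pyGetD_natCast]
  exact List.getD_eq_getElem _ _ (by omega)

lemma take_one_cons {α : Type} (a : α) (l : List α) : List.take 1 (a :: l) = [a] := by simp

lemma take_two_cons {α : Type} (a b : α) (l : List α) (k : ℕ) (hk : 2 ≤ k) :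
    List.take k (a :: b :: l) = a :: b :: List.take (k - 2) l := by
  obtain ⟨j, rfl⟩ : ∃ j, k = j + 2 := ⟨k - 2, by omega⟩
  simp [List.take_succ_cons]

lemma loop_eq (cs : List Char) :
    ∀ (m k : ℕ) (pr : Int), 1 ≤ k → k - 1 + m = cs.length / 2 →
    loopA cs (cs.length : Int)
      ((List.range m).map (fun i => ((2 * (k + i) : ℕ) : Int)))
      (poly ((cs.drop (cs.length - 2 * (k - 1))).take (k - 1)) % 101)
      pr
      (poly (cs.drop (cs.length - (k - 1))) % 101)
      (265 ^ (k - 2))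
    = loopB cs (cs.length : Int) ((List.range m).map (fun i => ((k + i : ℕ) : Int))) := by
  intro m
  induction m with
  | zero => intro k pr hk hm; simp [loopA, loopB]
  | succ m ih =>
    intro k pr hk hm
    have h2k : 2 * k ≤ cs.length := by omega
    have hn2 : 2 ≤ cs.length := by omega
    rw [List.range_succ_eq_map, List.map_cons, List.map_cons, List.map_map, List.map_map]
    rw [loopA, loopB]
    -- the character reads
    have hfd : PySem.Int.floordiv ((2 * (k + 0) : ℕ) : Int) 2 = ((k : ℕ) : Int) := by
      rw [PySem.Int.floordiv_eq_ediv_of_pos (by norm_num)]; omega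
    rw [hfd]
    have hc : PySem.List.pyGetD cs ((cs.length : Int) - ((k : ℕ) : Int)) ' '
        = cs[cs.length - k]'(by omega) := getIdx cs k hk (by omega)
    rw [hc]
    have hAddIdx : (cs.length : Int) - ((2 * (k + 0) : ℕ) : Int) + 1
        = (cs.length : Int) - ((2 * k - 1 : ℕ) : Int) := by omega
    rw [hAddIdx, getIdx cs (2 * k - 1) (by omega) (by omega)]
    have hExtIdx : (cs.length : Int) - ((2 * (k + 0) : ℕ) : Int)
        = (cs.length : Int) - ((2 * k : ℕ) : Int) := by omega
    rw [hExtIdx, getIdx cs (2 * k) (by omega) h2k]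
    -- hashRight update
    have e1 : cs.length - (k - 1) = cs.length - k + 1 := by omega
    have hdropR : cs.drop (cs.length - k)
        = cs[cs.length - k]'(by omega) :: cs.drop (cs.length - (k - 1)) := by
      rw [e1, List.drop_eq_getElem_cons (by omega)]
    have hR : hashExtendA (cs[cs.length - k]'(by omega)) (poly (cs.drop (cs.length - (k - 1))) % 101)
        = poly (cs.drop (cs.length - k)) % 101 := by
      rw [hdropR]; exact hashExtendA_poly _ _
    rw [hR]
    -- B's slices
    have hsl : PySem.List.slice cs (some ((cs.length : Int) - 2 * ((k + 0 : ℕ) : Int)))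
          (some ((cs.length : Int) - ((k + 0 : ℕ) : Int)))
        = (cs.drop (cs.length - 2 * k)).take k := by
      have e2 : (cs.length : Int) - 2 * ((k + 0 : ℕ) : Int) = ((cs.length - 2 * k : ℕ) : Int) := by omega
      have e3 : (cs.length : Int) - ((k + 0 : ℕ) : Int) = ((cs.length - k : ℕ) : Int) := by omega
      rw [e2, e3, PySem.List.slice_natCast]
      congr 1; omega
    have hsr : PySem.List.slice cs (some ((cs.length : Int) - ((k + 0 : ℕ) : Int))) none
        = cs.drop (cs.length - k) := by
      have e3 : (cs.length : Int) - ((k + 0 : ℕ) : Int) = ((cs.length - k : ℕ) : Int) := by omega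
      rw [e3, PySem.List.slice_from_natCast]
    rw [hsl, hsr, halfHashB_eq, halfHashB_eq]
    -- the updated left hash and power
    have hW : (if (((2 * (k + 0) : ℕ) : Int) == 2) = true then
          (hashExtendA (cs[cs.length - 2 * k]'(by omega))
            (poly ((cs.drop (cs.length - 2 * (k - 1))).take (k - 1)) % 101), (265 : Int) ^ (k - 2))
        else
          (hashExtendA (cs[cs.length - 2 * k]'(by omega))
            (hashShiftA (cs[cs.length - (2 * k - 1)]'(by omega)) (cs[cs.length - k]'(by omega))
              (poly ((cs.drop (cs.length - 2 * (k - 1))).take (k - 1)) % 101) ((265 : Int) ^ (k - 2))),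
            (265 : Int) ^ (k - 2) * 265))
        = (poly ((cs.drop (cs.length - 2 * k)).take k) % 101, (265 : Int) ^ (k + 1 - 2)) := by
      by_cases hk1 : k = 1
      · subst hk1
        rw [if_pos (by decide)]
        have htake : (cs.drop (cs.length - 2 * (1 - 1))).take (1 - 1) = ([] : List Char) := by
          rw [List.take_zero]
        have htake1 : (cs.drop (cs.length - 2 * 1)).take 1
            = [cs[cs.length - 2 * 1]'(by omega)] := by
          rw [List.drop_eq_getElem_cons (by omega), take_one_cons]
        rw [htake, htake1]
        simp only [Prod.mk.injEq]
        exact ⟨hashExtendA_poly _ _, trivial⟩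
      · have hkk : 2 ≤ k := by omega
        rw [if_neg (by simp only [beq_iff_eq]; intro hcon; omega)]
        have hMlen : ((cs.drop (cs.length - 2 * k + 2)).take (k - 2)).length = k - 2 := by
          rw [List.length_take, List.length_drop]; omega
        have hWprev : (cs.drop (cs.length - 2 * (k - 1))).take (k - 1)
            = (cs.drop (cs.length - 2 * k + 2)).take (k - 2) ++ [cs[cs.length - k]'(by omega)] := by
          have e4 : cs.length - 2 * (k - 1) = cs.length - 2 * k + 2 := by omega
          have e5 : k - 1 = (k - 2) + 1 := by omega
          rw [e4, e5, List.take_add_one, List.getElem?_drop, List.getElem?_eq_getElem (by omega)]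
          simp only [Option.toList_some]
          congr 2
          exact getElem_congr rfl (by omega) (by omega)
        have hshift : hashShiftA (cs[cs.length - (2 * k - 1)]'(by omega)) (cs[cs.length - k]'(by omega))
              (poly ((cs.drop (cs.length - 2 * (k - 1))).take (k - 1)) % 101) ((265 : Int) ^ (k - 2))
            = poly (cs[cs.length - (2 * k - 1)]'(by omega)
                :: (cs.drop (cs.length - 2 * k + 2)).take (k - 2)) % 101 := by
          rw [hWprev]
          have h5 := hashShiftA_poly (cs[cs.length - (2 * k - 1)]'(by omega))
            (cs[cs.length - k]'(by omega)) ((cs.drop (cs.length - 2 * k + 2)).take (k - 2))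
          rw [hMlen] at h5
          exact h5
        rw [hshift]
        have hWk : (cs.drop (cs.length - 2 * k)).take k
            = cs[cs.length - 2 * k]'(by omega) :: cs[cs.length - (2 * k - 1)]'(by omega)
              :: (cs.drop (cs.length - 2 * k + 2)).take (k - 2) := by
          have d1 : cs.drop (cs.length - 2 * k)
              = cs[cs.length - 2 * k]'(by omega) :: cs[cs.length - (2 * k - 1)]'(by omega)
                :: cs.drop (cs.length - 2 * k + 2) := by
            rw [List.drop_eq_getElem_cons (by omega)]
            have e6 : cs.length - 2 * k + 1 = cs.length - (2 * k - 1) := by omega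
            rw [e6, List.drop_eq_getElem_cons (by omega)]
            have e7 : cs.length - (2 * k - 1) + 1 = cs.length - 2 * k + 2 := by omega
            rw [e7]
          rw [d1, take_two_cons _ _ _ k hkk]
        rw [hWk]
        simp only [Prod.mk.injEq]
        refine ⟨hashExtendA_poly _ _, ?_⟩
        rw [← pow_succ]
        congr 1
        omega
    rw [hW]
    dsimp only
    -- both sides now test the same condition
    by_cases hcond : poly ((cs.drop (cs.length - 2 * k)).take k) % 101
        = poly (cs.drop (cs.length - k)) % 101
    · rw [if_pos (by simpa using hcond), if_pos (by simpa using hcond)]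
    · rw [if_neg (by simpa using hcond), if_neg (by simpa using hcond)]
      have hf : ((fun i => ((2 * (k + i) : ℕ) : Int)) ∘ Nat.succ) = (fun i => ((2 * ((k + 1) + i) : ℕ) : Int)) := by
        funext i; simp only [Function.comp_apply]; congr 1; omega
      have hg : ((fun i => ((k + i : ℕ) : Int)) ∘ Nat.succ) = (fun i => (((k + 1) + i : ℕ) : Int)) := by
        funext i; simp only [Function.comp_apply]; congr 1; omega
      have h8 := ih (k + 1) (pr + 1) (by omega) (by omega)
      simp only [Nat.add_sub_cancel] at h8
      rw [hf, hg]
      exact h8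

lemma rangeA_eq (n : ℕ) : PySem.List.pyRange 2 ((n : Int) + 1) 2
    = (List.range (n / 2)).map (fun i => ((2 * (1 + i) : ℕ) : Int)) := by
  rw [PySem.List.pyRange_of_pos _ _ (by norm_num)]
  have hcount : (if (2 : Int) < (n : Int) + 1 then (((n : Int) + 1 - 2 + 2 - 1) / 2).toNat else 0)
      = n / 2 := by
    split_ifs with h
    · omega
    · omega
  rw [hcount]
  apply List.map_congr_left
  intro i _
  push_cast
  ring

lemma rangeB_eq (n : ℕ) : PySem.List.pyRange 1 (PySem.Int.floordiv (n : Int) 2 + 1) 1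
    = (List.range (n / 2)).map (fun i => ((1 + i : ℕ) : Int)) := by
  rw [PySem.List.pyRange_one]
  have hcount : ((PySem.Int.floordiv (n : Int) 2 + 1 - 1)).toNat = n / 2 := by
    rw [PySem.Int.floordiv_eq_ediv_of_pos (by norm_num)]; omega
  rw [hcount]
  apply List.map_congr_left
  intro i _
  push_cast
  ring


theorem main_eq (s : String) : loopA s.toList (PySem.Str.len s)
    (PySem.List.pyRange 2 (PySem.Str.len s + 1) 2) 0 0 0 1
    = loopB s.toList (PySem.Str.len s)
      (PySem.List.pyRange 1 (PySem.Int.floordiv (PySem.Str.len s) 2 + 1) 1) := by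
  rw [PySem.Str.len_eq, rangeA_eq, rangeB_eq]
  have h0 := loop_eq s.toList (s.toList.length / 2) 1 0 le_rfl (by omega)
  simp only [show (1 : ℕ) - 1 = 0 from rfl, Nat.mul_zero,
    Nat.sub_zero, List.take_zero, List.drop_length, pow_zero, poly, Int.zero_emod] at h0
  exact h0

-- ===== VERDICT (by name: the statement is the Claim_ definition above) =====
theorem squareAtLastCharWithHash_spec : Claim_equal_squareAtLastCharWithHash := by
  intro s _
  unfold Spec_squareAtLastCharWithHash squareAtLastCharWithHash squareAtLastCharWithHash_alt
  exact main_eq s
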